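-- pv_equiv track=rewrite | github.com/jamccarty/RegistrationProject | scripts/get_bmc_info.py | get_building
-- ===== SOURCE A (Python) =====
-- def get_building(list_of_dicts):
--   building = {}
--   for dict in list_of_dicts:
--     subject = dict["Subject"]
--     room = dict["Facil ID 1"]
--     if room == None or room == "":
--       continue
--     if subject in building:
--         building[subject].append(room)
--     else:
--         building[subject] = [room]
--   return building
-- ===== SOURCE B (Python) =====
-- def get_building(list_of_dicts):
--     valid = [(d["Subject"], d["Facil ID 1"]) for d in list_of_dicts
--              if d["Facil ID 1"] not in (None, "")]
--     subjects = list(dict.fromkeys(s for s, _ in valid))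
--     return {s: [r for t, r in valid if t == s] for s in subjects}
-- ===== Notes on version B (the rewrite author's own statement) =====
-- stated objective: idiomatic
-- what changed: Replaces the single fold that mutates a dict row by row with a declarative two-pass pipeline: filter the valid (subject, room) pairs, dedup the subjects in first-occurrence order, then build the result with one comprehension per subject. Pre_ excludes rows missing the 'Subject' or 'Facil ID 1' key (A raises KeyError there) and rows with a None subject and a non-empty room (A's dict then has the non-string key None, not representable in the declared return type).
-- outside the precondition, e.g. on get_building([{'Subject': None, 'Facil ID 1': 'R1'}]): A returns {None: ['R1']}, B returns {None: ['R1']}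
import Mathlib
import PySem

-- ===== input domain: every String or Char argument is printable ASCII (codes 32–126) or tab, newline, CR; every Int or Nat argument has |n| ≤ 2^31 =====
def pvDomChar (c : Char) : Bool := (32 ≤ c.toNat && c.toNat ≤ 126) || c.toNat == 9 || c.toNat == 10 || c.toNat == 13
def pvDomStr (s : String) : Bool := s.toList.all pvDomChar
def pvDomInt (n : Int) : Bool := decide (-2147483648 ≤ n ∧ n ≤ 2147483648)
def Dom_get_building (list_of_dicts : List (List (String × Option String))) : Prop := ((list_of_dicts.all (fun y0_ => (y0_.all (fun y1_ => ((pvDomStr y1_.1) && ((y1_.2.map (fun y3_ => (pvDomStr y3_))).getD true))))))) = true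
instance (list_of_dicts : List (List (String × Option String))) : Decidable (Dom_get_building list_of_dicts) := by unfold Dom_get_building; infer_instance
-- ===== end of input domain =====

-- B replaces A's row-by-row dict-building fold with a filter / dedup / per-subject comprehension pipeline (idiomatic; same result).

-- ===== PORT A =====
-- the two lookups of the loop body; getD none is safe because Pre_ guarantees both keys are present
def pvRoom (d : List (String × Option String)) : Option String :=
  (PySem.Dict.mk d).getD "Facil ID 1" none
def pvSubj (d : List (String × Option String)) : Option String :=
  (PySem.Dict.mk d).getD "Subject" none

def get_building (list_of_dicts : List (List (String × Option String))) : List (String × List String) :=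
  (list_of_dicts.foldl (fun building d =>
      let subject := pvSubj d
      let room := pvRoom d
      if room = none ∨ room = some "" then building
      else
        let s := subject.getD ""   -- Pre_ guarantees subject ≠ none on kept rows
        let r := room.getD ""
        if building.contains s then building.modify s [] (fun rs => rs ++ [r])
        else building.insert s [r])
    PySem.Dict.empty).items

-- ===== PORT B =====
def get_building_alt (list_of_dicts : List (List (String × Option String))) : List (String × List String) :=
  let valid : List (String × String) :=
    (list_of_dicts.filter (fun d => !decide (pvRoom d = none ∨ pvRoom d = some ""))).map
      (fun d => ((pvSubj d).getD "", (pvRoom d).getD ""))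
  let subjects := PySem.List.dedup (valid.map Prod.fst)
  subjects.map (fun s => (s, (valid.filter (fun p => p.1 == s)).map (·.2)))

-- ===== PRECONDITION & SPEC =====
-- Pre_ excludes rows missing the "Subject" or "Facil ID 1" key (A raises KeyError) and rows with a
-- None subject together with a non-empty room (A's dict then has the non-string key None, which the
-- declared return type List (String × List String) cannot represent).
def Pre_get_building (list_of_dicts : List (List (String × Option String))) : Prop :=
  ∀ d ∈ list_of_dicts,
    (PySem.Dict.mk d).contains "Subject" = true ∧
    (PySem.Dict.mk d).contains "Facil ID 1" = true ∧
    (¬(pvRoom d = none ∨ pvRoom d = some "") → pvSubj d ≠ none)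
instance (list_of_dicts : List (List (String × Option String))) : Decidable (Pre_get_building list_of_dicts) := by unfold Pre_get_building; infer_instance
def pvWitness_get_building : (List (List (String × Option String))) :=
  [[("Subject", some "MATH"), ("Facil ID 1", some "R1")],
   [("Subject", some "MATH"), ("Facil ID 1", some "")]]

def Spec_get_building (list_of_dicts : List (List (String × Option String))) (out : List (String × List String)) : Prop := out = get_building_alt list_of_dicts
instance (list_of_dicts : List (List (String × Option String))) (out : List (String × List String)) : Decidable (Spec_get_building list_of_dicts out) := by unfold Spec_get_building; infer_instance

-- ===== CLAIM (what is proved, stated in full; the proofs are below) =====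
def Claim_equal_get_building : Prop := ∀ (list_of_dicts : List (List (String × Option String))), Dom_get_building list_of_dicts → Pre_get_building list_of_dicts → Spec_get_building list_of_dicts (get_building list_of_dicts)

-- ===== LEMMAS AND PROOFS =====

-- skipping rows in a fold = folding over the filtered list
theorem pv_foldl_skip {α β : Type} (c : α → Prop) [DecidablePred c] (g : β → α → β) :
    ∀ (l : List α) (init : β),
      l.foldl (fun b d => if c d then b else g b d) init
        = (l.filter (fun d => !decide (c d))).foldl g init := by
  intro l
  induction l with
  | nil => intro init; rfl
  | cons d l ih =>
    intro init
    by_cases h : c d <;> simp [h, ih]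

-- A's branch on membership is exactly one Dict.modify
theorem pv_branch_eq_modify (b : PySem.Dict String (List String)) (s : String) (r : String) :
    (if b.contains s then b.modify s [] (fun rs => rs ++ [r]) else b.insert s [r])
      = b.modify s [] (fun rs => rs ++ [r]) := by
  by_cases h : b.contains s = true
  · simp [h]
  · have h' : b.contains s = false := by simpa using h
    simp [h', PySem.Dict.modify, PySem.Dict.getD_of_not_contains b ([] : List String) h']

theorem get_building_spec : Claim_equal_get_building := by
  intro l _ _
  unfold Spec_get_building get_building get_building_alt
  -- A's loop body is one Dict.modify per kept row
  have hbody :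
      (fun (building : PySem.Dict String (List String)) (d : List (String × Option String)) =>
        let subject := pvSubj d
        let room := pvRoom d
        if room = none ∨ room = some "" then building
        else
          let s := subject.getD ""
          let r := room.getD ""
          if building.contains s then building.modify s [] (fun rs => rs ++ [r])
          else building.insert s [r])
      = (fun building d =>
          if pvRoom d = none ∨ pvRoom d = some "" then building
          else building.modify ((pvSubj d).getD "") [] (fun rs => rs ++ [(pvRoom d).getD ""])) := by
    funext building d
    by_cases h : pvRoom d = none ∨ pvRoom d = some ""
    · simp [h]
    · simp only [h, if_false]
      exact pv_branch_eq_modify building _ _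
  rw [hbody, pv_foldl_skip (fun d => pvRoom d = none ∨ pvRoom d = some "")]
  set F := l.filter (fun d => !decide (pvRoom d = none ∨ pvRoom d = some "")) with hF
  set valid : List (String × String) :=
    F.map (fun d => ((pvSubj d).getD "", (pvRoom d).getD "")) with hvalid
  have hfold :
      F.foldl (fun b d => b.modify ((pvSubj d).getD "") [] (fun rs => rs ++ [(pvRoom d).getD ""]))
          PySem.Dict.empty
        = valid.foldl (fun b p => b.modify p.1 [] (fun rs => rs ++ [p.2])) PySem.Dict.empty := by
    rw [hvalid, List.foldl_map]
  rw [hfold]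
  set D := valid.foldl (fun b p => b.modify p.1 [] (fun rs => rs ++ [p.2])) PySem.Dict.empty with hD
  have hnd : D.keys.Nodup := by
    rw [hD]
    exact PySem.Dict.nodup_keys_foldl_modify_key valid Prod.fst [] _ _ PySem.Dict.nodup_keys_empty
  have hkeys : D.keys = PySem.List.dedup (valid.map Prod.fst) := by
    rw [hD, PySem.Dict.keys_foldl_modify_key, PySem.Dict.keys_empty,
        PySem.List.dedup_eq_ofList, PySem.Set.update_nil_left]
  rw [PySem.Dict.items_eq_map_keys D hnd [], hkeys]
  refine List.map_congr_left (fun s _ => ?_)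
  have hg : D.getD s [] = (valid.filter (fun p => p.1 == s)).map (·.2) := by
    rw [hD, PySem.Dict.getD_foldl_modify_append, PySem.Dict.getD_empty, List.nil_append]
  rw [hg]
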